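-- pv_equiv track=rewrite | github.com/MogaDenis/Obstruction-Game | src/ai/ai.py | find_average_moves
-- ===== SOURCE A (Python) =====
-- def find_average_moves(valid_positions, max_profit):
--     """
--         This method works similarly to the one which searches for the best moves, only difference is that this one finds the best
--     set of moves worse than the best ones found previously.
--
--     :param valid_positions: Dicitionary having as keys positions and as values the number of spaces blocked by each move.
--     :param max_profit: The maximum number of positions blocked by a previous set of moves.
--     :return: List of the moves which block the largest number of spaces, less than a given maximum.
--     """
--     average_profit = 0
--     average_moves = []
--
--     for position in valid_positions:
--         if valid_positions[position] > average_profit and valid_positions[position] < max_profit: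
--             average_profit = valid_positions[position]
--             average_moves = [position]
--         elif valid_positions[position] == average_profit:
--             average_moves.append(position)
--
--     return average_moves, average_profit
-- ===== SOURCE B (Python) =====
-- def find_average_moves(valid_positions, max_profit):
--     target = max((v for v in valid_positions.values() if 0 < v < max_profit), default=0)
--     moves = [p for p, v in valid_positions.items() if v == target]
--     return moves, target
-- ===== Notes on version B (the rewrite author's own statement) =====
-- stated objective: simpler
-- what changed: Replaced the fused running-max-with-reset accumulator loop by two independent passes: an explicit max (with default 0) over the values strictly between 0 and max_profit, then a filter collecting every position whose value equals that max.
import Mathlib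
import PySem

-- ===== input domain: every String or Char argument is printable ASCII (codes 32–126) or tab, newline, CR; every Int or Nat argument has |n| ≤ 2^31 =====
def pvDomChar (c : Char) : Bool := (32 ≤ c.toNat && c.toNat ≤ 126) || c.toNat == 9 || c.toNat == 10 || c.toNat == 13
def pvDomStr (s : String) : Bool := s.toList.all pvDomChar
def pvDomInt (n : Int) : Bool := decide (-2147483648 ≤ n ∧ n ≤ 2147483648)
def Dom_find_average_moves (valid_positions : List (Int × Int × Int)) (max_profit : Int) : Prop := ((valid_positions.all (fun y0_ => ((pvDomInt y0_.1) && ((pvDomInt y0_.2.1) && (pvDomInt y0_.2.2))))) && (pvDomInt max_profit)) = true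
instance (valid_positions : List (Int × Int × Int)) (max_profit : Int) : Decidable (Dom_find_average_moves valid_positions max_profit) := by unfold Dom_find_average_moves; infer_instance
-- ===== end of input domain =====

-- B replaces A's fused running-max-with-reset loop by an explicit max over the qualifying
-- values followed by an equality filter (simpler decomposition; same cost).

-- B replaces A's fused running-max-with-reset loop by an explicit max over the qualifying
-- values followed by an equality filter (simpler decomposition; same cost).

-- ===== PORT A =====
-- The dict parameter arrives as a flat triple list; rebuild the Python dict.
def pvToDict (valid_positions : List (Int × Int × Int)) : PySem.Dict (Int × Int) Int :=
  PySem.Dict.ofList (valid_positions.map (fun t => ((t.1, t.2.1), t.2.2)))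

-- A's loop body: state = (average_moves, average_profit), pv = (position, blocked count).
def pvStep (m : Int) (st : List (Int × Int) × Int) (pv : (Int × Int) × Int) : List (Int × Int) × Int :=
  if st.2 < pv.2 ∧ pv.2 < m then ([pv.1], pv.2)
  else if pv.2 == st.2 then (st.1 ++ [pv.1], st.2)
  else st

-- 'for position in valid_positions' with 'valid_positions[position]' walks the dict's
-- (key, value) items in insertion order (exact: dict keys are unique, so the subscript
-- lookup yields exactly the item's value).
def find_average_moves (valid_positions : List (Int × Int × Int)) (max_profit : Int) : (List (Int × Int)) × Int :=
  let d := pvToDict valid_positions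
  d.items.foldl (pvStep max_profit) ([], 0)

-- ===== PORT B =====
def find_average_moves_alt (valid_positions : List (Int × Int × Int)) (max_profit : Int) : (List (Int × Int)) × Int :=
  let d := pvToDict valid_positions
  -- max((v for v in d.values() if 0 < v < max_profit), default=0)
  let target := ((PySem.List.max? ((d.values).filter (fun v => decide (0 < v) && decide (v < max_profit))) (fun y => y)).map (fun y => y)).getD 0
  let moves := (d.items.filter (fun pv => pv.2 == target)).map (fun pv => pv.1)
  (moves, target)

-- ===== PRECONDITION & SPEC =====
def Spec_find_average_moves (valid_positions : List (Int × Int × Int)) (max_profit : Int) (out : (List (Int × Int)) × Int) : Prop := out = find_average_moves_alt valid_positions max_profit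
instance (valid_positions : List (Int × Int × Int)) (max_profit : Int) (out : (List (Int × Int)) × Int) : Decidable (Spec_find_average_moves valid_positions max_profit out) := by unfold Spec_find_average_moves; infer_instance

-- ===== CLAIM (what is proved, stated in full; the proofs are below) =====
def Claim_equal_find_average_moves : Prop := ∀ (valid_positions : List (Int × Int × Int)) (max_profit : Int), Dom_find_average_moves valid_positions max_profit → Spec_find_average_moves valid_positions max_profit (find_average_moves valid_positions max_profit)

-- ===== LEMMAS AND PROOFS =====

-- the running profit of A's loop
def pvF (m : Int) (l : List ((Int × Int) × Int)) (p : Int) : Int :=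
  l.foldl (fun a pv => if a < pv.2 ∧ pv.2 < m then pv.2 else a) p

theorem pvF_cons (m : Int) (h : (Int × Int) × Int) (t : List ((Int × Int) × Int)) (p : Int) :
    pvF m (h :: t) p = pvF m t (if p < h.2 ∧ h.2 < m then h.2 else p) := rfl

theorem pvF_ge (m : Int) (l : List ((Int × Int) × Int)) (p : Int) : p ≤ pvF m l p := by
  induction l generalizing p with
  | nil => simp [pvF]
  | cons h t ih =>
    rw [pvF_cons]
    split_ifs with hc
    · exact le_trans (le_of_lt hc.1) (ih h.2)
    · exact ih p

theorem pvF_bound (m : Int) (l : List ((Int × Int) × Int)) (p : Int) :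
    pvF m l p = p ∨ pvF m l p < m := by
  induction l generalizing p with
  | nil => simp [pvF]
  | cons h t ih =>
    rw [pvF_cons]
    split_ifs with hc
    · rcases ih h.2 with h1 | h1
      · right; omega
      · right; exact h1
    · exact ih p

theorem pvF_eq_max (m : Int) (l : List ((Int × Int) × Int)) (p : Int) :
    pvF m l p = ((l.map (fun pv => pv.2)).filter (fun v => decide (v < m))).foldl max p := by
  induction l generalizing p with
  | nil => simp [pvF]
  | cons h t ih =>
    rw [pvF_cons]
    simp only [List.map_cons, List.filter_cons]
    by_cases hm : h.2 < m
    · rw [show (if p < h.2 ∧ h.2 < m then h.2 else p) = max p h.2 by split_ifs <;> omega, ih]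
      simp [hm]
    · rw [show (if p < h.2 ∧ h.2 < m then h.2 else p) = p by split_ifs <;> omega, ih]
      simp [hm]

theorem foldl_max_filter_pos (L : List Int) (p : Int) (hp : 0 ≤ p) :
    L.foldl max p = (L.filter (fun v => decide (0 < v))).foldl max p := by
  induction L generalizing p with
  | nil => rfl
  | cons v t ih =>
    simp only [List.foldl_cons, List.filter_cons]
    by_cases hv : 0 < v
    · simp only [hv, decide_true, if_true, List.foldl_cons]
      exact ih (max p v) (by omega)
    · simp only [hv, decide_false]
      rw [show max p v = p by omega]
      exact ih p hp

-- characterisation of A's whole loop from an arbitrary state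
theorem pvA_loop (m : Int) (l : List ((Int × Int) × Int)) (p : Int) (ms : List (Int × Int)) :
    l.foldl (pvStep m) (ms, p)
    = (if pvF m l p = p then ms ++ (l.filter (fun pv => pv.2 == p)).map (fun pv => pv.1)
       else (l.filter (fun pv => pv.2 == pvF m l p)).map (fun pv => pv.1),
       pvF m l p) := by
  induction l generalizing p ms with
  | nil => simp [pvF]
  | cons h t ih =>
    simp only [List.foldl_cons]
    by_cases hc : p < h.2 ∧ h.2 < m
    · have hF : pvF m (h :: t) p = pvF m t h.2 := by rw [pvF_cons, if_pos hc]
      rw [show pvStep m (ms, p) h = ([h.1], h.2) by simp [pvStep, hc], ih h.2 [h.1], hF]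
      have hge : h.2 ≤ pvF m t h.2 := pvF_ge m t h.2
      rw [if_neg (show ¬ pvF m t h.2 = p by omega)]
      by_cases he : pvF m t h.2 = h.2
      · rw [if_pos he, he]
        simp
      · rw [if_neg he]
        have hne : (h.2 == pvF m t h.2) = false := by simp only [beq_eq_false_iff_ne]; omega
        simp [hne]
    · have hF : pvF m (h :: t) p = pvF m t p := by rw [pvF_cons, if_neg hc]
      have hgep : p ≤ pvF m t p := pvF_ge m t p
      by_cases he : h.2 = p
      · rw [show pvStep m (ms, p) h = (ms ++ [h.1], p) by simp [pvStep, he], ih p (ms ++ [h.1]), hF]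
        by_cases h0 : pvF m t p = p
        · rw [if_pos h0, if_pos h0]
          simp [he, List.append_assoc]
        · rw [if_neg h0, if_neg h0]
          have hne : (h.2 == pvF m t p) = false := by simp only [beq_eq_false_iff_ne]; omega
          simp [hne]
      · rw [show pvStep m (ms, p) h = (ms, p) by simp [pvStep, hc, he], ih p ms, hF]
        by_cases h0 : pvF m t p = p
        · rw [if_pos h0, if_pos h0]
          have hne : (h.2 == p) = false := by simpa using he
          simp [hne]
        · rw [if_neg h0, if_neg h0]
          have hne : (h.2 == pvF m t p) = false := by
            simp only [beq_eq_false_iff_ne]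
            intro hcon
            rcases pvF_bound m t p with h1 | h1
            · exact h0 h1
            · exact hc (by omega)
          simp [hne]

-- B's target equals A's final profit
theorem pv_target_eq (m : Int) (l : List ((Int × Int) × Int)) :
    ((PySem.List.max? ((l.map (fun pv => pv.2)).filter (fun v => decide (0 < v) && decide (v < m))) (fun y => y)).map (fun y => y)).getD 0
      = pvF m l 0 := by
  rw [pvF_eq_max m l 0, foldl_max_filter_pos _ 0 le_rfl]
  have hcomb : ((l.map (fun pv => pv.2)).filter (fun v => decide (v < m))).filter (fun v => decide (0 < v))
      = (l.map (fun pv => pv.2)).filter (fun v => decide (0 < v) && decide (v < m)) := by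
    rw [List.filter_filter]
  rw [hcomb]
  cases hP : (l.map (fun pv => pv.2)).filter (fun v => decide (0 < v) && decide (v < m)) with
  | nil => rfl
  | cons p t =>
    have hp : 0 < p := by
      have hmem : p ∈ (l.map (fun pv => pv.2)).filter (fun v => decide (0 < v) && decide (v < m)) := by
        rw [hP]; exact List.mem_cons_self
      have := List.of_mem_filter hmem
      simp at this; exact this.1
    rw [PySem.List.max?_id_cons]
    simp only [Option.map_some, Option.getD_some, List.foldl_cons]
    rw [show max (0 : Int) p = p by omega]

-- ===== VERDICT (by name: the statement is the Claim_ definition above) =====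
theorem find_average_moves_spec : Claim_equal_find_average_moves := by
  intro vp m _
  unfold Spec_find_average_moves find_average_moves find_average_moves_alt
  simp only []
  rw [pvA_loop m (pvToDict vp).items 0 []]
  have hv : (pvToDict vp).values = (pvToDict vp).items.map (fun pv => pv.2) := rfl
  rw [hv, pv_target_eq m (pvToDict vp).items]
  split_ifs with h0
  · rw [h0]; simp
  · rfl
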